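-- pv_equiv track=rewrite | github.com/txst-cs-smartfall/DualStreamKalmanTransformer | utils/ray_distributed.py | assign_folds_to_gpus
-- ===== SOURCE A (Python) =====
-- from typing import Dict, List, Tuple, Optional, Any
--
-- def assign_folds_to_gpus(
--     test_candidates: List[int],
--     num_gpus: int
-- ) -> Dict[int, List[Tuple[int, int]]]:
--     """
--     Assign folds to GPUs using round-robin distribution.
--
--     Example with 21 folds, 3 GPUs:
--     - GPU 0: folds 0, 3, 6, 9, 12, 15, 18 (7 folds)
--     - GPU 1: folds 1, 4, 7, 10, 13, 16, 19 (7 folds)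
--     - GPU 2: folds 2, 5, 8, 11, 14, 17, 20 (7 folds)
--
--     Args:
--         test_candidates: List of test subject IDs
--         num_gpus: Number of GPUs to distribute across
--
--     Returns:
--         Dict mapping gpu_id -> list of (fold_idx, subject_id) tuples
--     """
--     assignments = {gpu_id: [] for gpu_id in range(num_gpus)}
--     for fold_idx, subject in enumerate(test_candidates):
--         gpu_id = fold_idx % num_gpus
--         assignments[gpu_id].append((fold_idx, subject))
--     return assignments
-- ===== SOURCE B (Python) =====
-- def assign_folds_to_gpus(test_candidates, num_gpus):
--     # Per-GPU striding: GPU g gets folds g, g+num_gpus, g+2*num_gpus, ...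
--     return {
--         gpu_id: [(i, test_candidates[i])
--                  for i in range(gpu_id, len(test_candidates), num_gpus)]
--         for gpu_id in range(num_gpus)
--     }
-- ===== Notes on version B (the rewrite author's own statement) =====
-- stated objective: alternative
-- what changed: B builds each GPU's fold list directly by striding range(gpu_id, len(test_candidates), num_gpus) in a dict comprehension, instead of A's single pass over folds appending via fold_idx % num_gpus.
import Mathlib
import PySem

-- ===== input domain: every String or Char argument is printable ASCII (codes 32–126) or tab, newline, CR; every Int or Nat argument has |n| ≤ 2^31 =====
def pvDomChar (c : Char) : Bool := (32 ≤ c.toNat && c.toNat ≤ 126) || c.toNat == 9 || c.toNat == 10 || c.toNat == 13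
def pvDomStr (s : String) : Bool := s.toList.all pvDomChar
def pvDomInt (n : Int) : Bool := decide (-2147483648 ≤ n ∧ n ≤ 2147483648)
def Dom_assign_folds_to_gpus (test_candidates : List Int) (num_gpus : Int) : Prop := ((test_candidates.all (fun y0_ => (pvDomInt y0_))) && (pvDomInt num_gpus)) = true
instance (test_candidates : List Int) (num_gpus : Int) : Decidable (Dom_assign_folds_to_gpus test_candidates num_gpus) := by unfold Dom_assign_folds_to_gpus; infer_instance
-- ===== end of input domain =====

-- B assigns folds per-GPU by striding range(gpu_id, n, num_gpus) instead of A's per-fold modulo pass (alternative decomposition, same cost).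


-- ===== PORT A =====
-- assignments = {gpu_id: [] for gpu_id in range(num_gpus)}; then for (fold_idx, subject)
-- in enumerate(test_candidates): assignments[fold_idx % num_gpus].append((fold_idx, subject)).
-- 'assignments[k].append(x)' is ported as Dict.modify with default [] — exact under Pre_,
-- where the key is always present.
def assign_folds_to_gpus (test_candidates : List Int) (num_gpus : Int) : List (Int × List (Int × Int)) :=
  let init : PySem.Dict Int (List (Int × Int)) :=
    (PySem.List.pyRange 0 num_gpus 1).foldl (fun d g => d.insert g []) PySem.Dict.empty
  ((PySem.List.enumerate test_candidates).foldl
    (fun d p => d.modify (PySem.Int.mod p.1 num_gpus) [] (fun l => l ++ [p])) init).items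

-- ===== PORT B =====
-- {gpu_id: [(i, test_candidates[i]) for i in range(gpu_id, len(tc), num_gpus)] for gpu_id in range(num_gpus)}.
-- 'test_candidates[i]' is ported as pyGetD with default 0 — exact, since i is always in range.
def assign_folds_to_gpus_alt (test_candidates : List Int) (num_gpus : Int) : List (Int × List (Int × Int)) :=
  ((PySem.List.pyRange 0 num_gpus 1).foldl
    (fun d g => d.insert g
      ((PySem.List.pyRange g (PySem.List.len test_candidates) num_gpus).map
        (fun i => (i, PySem.List.pyGetD test_candidates i 0))))
    PySem.Dict.empty).items

-- ===== PRECONDITION & SPEC =====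
-- Pre_ excludes exactly the inputs where A raises: num_gpus <= 0 with a non-empty list
-- (ZeroDivisionError at num_gpus == 0, KeyError at negative num_gpus).
def Pre_assign_folds_to_gpus (test_candidates : List Int) (num_gpus : Int) : Prop :=
  0 < num_gpus ∨ test_candidates = []
instance (test_candidates : List Int) (num_gpus : Int) : Decidable (Pre_assign_folds_to_gpus test_candidates num_gpus) := by unfold Pre_assign_folds_to_gpus; infer_instance

def pvWitness_assign_folds_to_gpus : List Int × Int := ([7, 8, 9, 10, 11], 3)

def Spec_assign_folds_to_gpus (test_candidates : List Int) (num_gpus : Int) (out : List (Int × List (Int × Int))) : Prop := out = assign_folds_to_gpus_alt test_candidates num_gpus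
instance (test_candidates : List Int) (num_gpus : Int) (out : List (Int × List (Int × Int))) : Decidable (Spec_assign_folds_to_gpus test_candidates num_gpus out) := by unfold Spec_assign_folds_to_gpus; infer_instance

-- ===== CLAIM (what is proved, stated in full; the proofs are below) =====
def Claim_equal_assign_folds_to_gpus : Prop := ∀ (test_candidates : List Int) (num_gpus : Int), Dom_assign_folds_to_gpus test_candidates num_gpus → Pre_assign_folds_to_gpus test_candidates num_gpus → Spec_assign_folds_to_gpus test_candidates num_gpus (assign_folds_to_gpus test_candidates num_gpus)

-- ===== LEMMAS AND PROOFS =====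

-- Set.update leaves a set unchanged when every added element is already a member.
lemma set_update_of_mem {s l : List Int} (h : ∀ x ∈ l, x ∈ s) : PySem.Set.update s l = s := by
  induction l generalizing s with
  | nil => rfl
  | cons x l ih =>
      have hx : x ∈ s := h x (by simp)
      have : PySem.Set.add s x = s := by
        simp [PySem.Set.add, PySem.Set.contains, hx]
      simp only [PySem.Set.update, List.foldl_cons]
      rw [show (PySem.Set.add s x) = s from this]
      exact ih (fun y hy => h y (by simp [hy]))

-- The membership characterisation that links "fold_idx % ng = g" with the stride range.
lemma filter_mod_eq_stride (ng g : Int) (hng : 0 < ng) (hg0 : 0 ≤ g) (hg : g < ng) (n : Int) :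
    (PySem.List.pyRange 0 n 1).filter (fun j => PySem.Int.mod j ng == g)
      = PySem.List.pyRange g n ng := by
  have hmem : ∀ x : Int,
      x ∈ (PySem.List.pyRange 0 n 1).filter (fun j => PySem.Int.mod j ng == g)
        ↔ x ∈ PySem.List.pyRange g n ng := by
    intro x
    rw [List.mem_filter, PySem.List.mem_pyRange_one, PySem.List.mem_pyRange_iff_of_pos hng]
    simp only [beq_iff_eq, PySem.Int.mod_eq_emod_of_pos hng]
    constructor
    · rintro ⟨⟨hx0, hxn⟩, hmod⟩
      have hdef := Int.emod_def x ng
      have ht : x - g = ng * (x / ng) := by omega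
      have hq : 0 ≤ x / ng := Int.ediv_nonneg hx0 hng.le
      have hgx : g ≤ x := by nlinarith
      exact ⟨hgx, hxn, ⟨x / ng, ht⟩⟩
    · rintro ⟨hgx, hxn, t, ht⟩
      have hx0 : 0 ≤ x := le_trans hg0 hgx
      refine ⟨⟨hx0, hxn⟩, ?_⟩
      have hxe : x = g + ng * t := by omega
      rw [hxe, Int.add_mul_emod_self_left, Int.emod_eq_of_lt hg0 hg]
  -- both sides are strictly increasing and have the same members, hence equal
  have hnd1 : ((PySem.List.pyRange 0 n 1).filter (fun j => PySem.Int.mod j ng == g)).Pairwise (· < ·) :=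
    (PySem.List.pairwise_lt_pyRange_one 0 n).filter _
  have hnd2 : (PySem.List.pyRange g n ng).Pairwise (· < ·) := by
    rw [PySem.List.pyRange_of_pos g n hng]
    refine List.Pairwise.map _ ?_ (List.pairwise_lt_range)
    intro a b hab
    nlinarith
  have hperm : ((PySem.List.pyRange 0 n 1).filter (fun j => PySem.Int.mod j ng == g)).Perm
      (PySem.List.pyRange g n ng) := by
    apply List.perm_of_nodup_nodup_toFinset_eq
      (hnd1.nodup) (hnd2.nodup)
    ext x
    simp only [List.mem_toFinset]
    exact hmem x
  exact List.Perm.eq_of_pairwise (fun a b _ _ h1 h2 => by omega) hnd1 hnd2 hperm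

lemma main_eq (tc : List Int) (ng : Int) (hng : 0 < ng) :
    assign_folds_to_gpus tc ng = assign_folds_to_gpus_alt tc ng := by
  -- shared notation
  set R := PySem.List.pyRange 0 ng 1 with hR
  have hRnodup : R.Nodup := PySem.List.nodup_pyRange_one 0 ng
  have hRmem : ∀ g ∈ R, 0 ≤ g ∧ g < ng := by
    intro g hgmem
    have := (PySem.List.mem_pyRange_one).mp hgmem
    omega
  -- init dict of A: items = R.map (fun g => (g, []))
  have hinit_items :
      ((R.foldl (fun d g => d.insert g ([] : List (Int × Int))) PySem.Dict.empty)).items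
        = R.map (fun g => (g, ([] : List (Int × Int)))) := by
    have := PySem.Dict.items_foldl_insert_fresh R (fun g => g)
      (fun _ => ([] : List (Int × Int))) PySem.Dict.empty
      (by intro a _; simp) (by simpa using hRnodup)
    simpa using this
  set init := R.foldl (fun d g => d.insert g ([] : List (Int × Int))) PySem.Dict.empty with hinit
  have hinit_keys : init.keys = R := by
    simp [PySem.Dict.keys, hinit_items, List.map_map, Function.comp_def]
  have hinit_getD : ∀ g ∈ R, init.getD g [] = [] := by
    intro g hgmem
    exact PySem.Dict.getD_of_mem_items init
      (by rw [hinit_items]; exact List.mem_map_of_mem hgmem)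
      (by rw [hinit_keys]; exact hRnodup) []
  -- final dict of A
  set fin := (PySem.List.enumerate tc).foldl
    (fun d p => d.modify (PySem.Int.mod p.1 ng) [] (fun l => l ++ [p])) init with hfin
  have hfin_keys : fin.keys = R := by
    rw [hfin, PySem.Dict.keys_foldl_modify_key (PySem.List.enumerate tc)
      (fun p => PySem.Int.mod p.1 ng) [] (fun _ p l => l ++ [p]) init, hinit_keys]
    apply set_update_of_mem
    intro x hx
    simp only [List.mem_map] at hx
    obtain ⟨p, _, rfl⟩ := hx
    rw [hR, PySem.List.mem_pyRange_one]
    have := Int.emod_nonneg p.1 (by omega : ng ≠ 0)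
    have := Int.emod_lt_of_pos p.1 hng
    rw [PySem.Int.mod_eq_emod_of_pos hng]
    omega
  have hfin_getD : ∀ g ∈ R, fin.getD g []
      = (PySem.List.pyRange g (PySem.List.len tc) ng).map
          (fun i => (i, PySem.List.pyGetD tc i 0)) := by
    intro g hgmem
    obtain ⟨hg0, hglt⟩ := hRmem g hgmem
    have hfold : fin = ((PySem.List.enumerate tc).map
        (fun p => (PySem.Int.mod p.1 ng, p))).foldl
        (fun d q => d.modify q.1 [] (fun l => l ++ [q.2])) init := by
      rw [hfin, List.foldl_map]
    rw [hfold, PySem.Dict.getD_foldl_modify_append, hinit_getD g hgmem, List.nil_append,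
        List.filter_map]
    have henum : PySem.List.enumerate tc
        = (PySem.List.pyRange 0 (PySem.List.len tc) 1).map
            (fun j => (j, PySem.List.pyGetD tc j 0)) :=
      PySem.List.enumerate_eq_map_pyRange tc 0
    rw [henum, List.filter_map]
    simp only [List.map_map, Function.comp_def]
    rw [filter_mod_eq_stride ng g hng hg0 hglt (PySem.List.len tc)]
  -- assemble
  have hfin_items : fin.items = R.map (fun g =>
      (g, (PySem.List.pyRange g (PySem.List.len tc) ng).map
            (fun i => (i, PySem.List.pyGetD tc i 0)))) := by
    rw [PySem.Dict.items_eq_map_keys fin (by rw [hfin_keys]; exact hRnodup) []]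
    rw [hfin_keys]
    exact List.map_congr_left (fun g hgmem => by rw [hfin_getD g hgmem])
  have halt : assign_folds_to_gpus_alt tc ng = R.map (fun g =>
      (g, (PySem.List.pyRange g (PySem.List.len tc) ng).map
            (fun i => (i, PySem.List.pyGetD tc i 0)))) := by
    unfold assign_folds_to_gpus_alt
    have := PySem.Dict.items_foldl_insert_fresh R (fun g => g)
      (fun g => (PySem.List.pyRange g (PySem.List.len tc) ng).map
            (fun i => (i, PySem.List.pyGetD tc i 0))) PySem.Dict.empty
      (by intro a _; simp) (by simpa using hRnodup)
    simpa [hR] using this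
  show fin.items = _
  rw [hfin_items, halt]

-- ===== VERDICT (by name: the statement is the Claim_ definition above) =====
theorem assign_folds_to_gpus_spec : Claim_equal_assign_folds_to_gpus := by
  intro tc ng _ hpre
  unfold Spec_assign_folds_to_gpus
  rcases hpre with hng | rfl
  · exact main_eq tc ng hng
  · by_cases hpos : 0 < ng
    case pos => exact main_eq [] ng hpos
    case neg =>
      have hle : ng ≤ 0 := by omega
      have h1 : PySem.List.pyRange 0 ng 1 = [] := PySem.List.pyRange_one_eq_nil hle
      simp [assign_folds_to_gpus, assign_folds_to_gpus_alt, h1, PySem.List.enumerate]
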